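-- pv_equiv track=rewrite | github.com/robertostling/efselab | tagger.py | ud_verb_heuristics
-- ===== SOURCE A (Python) =====
-- def ud_verb_heuristics(ud_tags, tokens, lemmas):
--     """Heuristics to improve accuracy of UD tags, return modified ud_tags"""
--     ud_tags = list(ud_tags)
--     n = len(ud_tags)
--     for i in range(n):
--         if ud_tags[i] == 'AUX':
--             if lemmas[i] == 'vara':
--                 # Trust the copula classifier
--                 continue
--             for j in range(i + 1, n):
--                 if ud_tags[j] in ('AUX', 'VERB'):
--                     # If followed by AUX or VERB, do nothing
--                     break
--                 if (ud_tags[j] in ('SCONJ', 'PUNCT')) \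
--                         or tokens[j].lower() == 'som' or j == n - 1:
--                     # If no AUX/VERB before SCONJ, PUNCT, "som" or end of
--                     # sentence, change to VERB
--                     ud_tags[i] = 'VERB'
--                     break
--     return ud_tags
-- ===== SOURCE B (Python) =====
-- def ud_verb_heuristics(ud_tags, tokens, lemmas):
--     """Heuristics to improve accuracy of UD tags, return modified ud_tags"""
--     n = len(ud_tags)
--     res = list(ud_tags)
--     pending = []  # AUX positions still waiting for a decisive later position
--     for j in range(n):
--         t = ud_tags[j]
--         if t in ('AUX', 'VERB'):
--             # decisive: every pending AUX keeps its tag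
--             pending = []
--         elif pending and (t in ('SCONJ', 'PUNCT')
--                           or tokens[j].lower() == 'som' or j == n - 1):
--             # decisive: every pending AUX becomes VERB
--             for i in pending:
--                 res[i] = 'VERB'
--             pending = []
--         if t == 'AUX' and lemmas[j] != 'vara':
--             pending.append(j)
--     return res
-- ===== Notes on version B (the rewrite author's own statement) =====
-- stated objective: alternative
-- what changed: Replaces the per-AUX nested forward rescan with a single forward pass that keeps a list of pending AUX positions and flushes them all at each decisive position (AUX/VERB keeps them, SCONJ/PUNCT/'som'/end relabels them); worst case drops from quadratic to linear, though random inputs rarely exercise A's quadratic path.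
import Mathlib
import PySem

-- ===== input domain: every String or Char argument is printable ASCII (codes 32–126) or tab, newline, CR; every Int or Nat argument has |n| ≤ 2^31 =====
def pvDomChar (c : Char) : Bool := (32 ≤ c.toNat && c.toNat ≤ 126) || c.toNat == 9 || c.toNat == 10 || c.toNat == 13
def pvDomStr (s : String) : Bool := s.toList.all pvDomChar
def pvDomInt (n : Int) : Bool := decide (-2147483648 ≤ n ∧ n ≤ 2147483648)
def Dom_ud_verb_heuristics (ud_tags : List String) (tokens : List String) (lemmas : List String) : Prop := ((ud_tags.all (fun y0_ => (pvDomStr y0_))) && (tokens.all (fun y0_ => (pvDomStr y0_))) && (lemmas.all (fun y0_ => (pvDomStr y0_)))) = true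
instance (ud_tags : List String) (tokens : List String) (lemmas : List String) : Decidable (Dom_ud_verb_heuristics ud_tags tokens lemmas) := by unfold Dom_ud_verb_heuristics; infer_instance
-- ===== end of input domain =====

-- B replaces A's nested per-AUX forward rescan with one forward pass over a pending-AUX list.

-- ===== PORT A =====
-- inner 'for j in range(i+1, n): … break' loop of A
def pvInnerA (tags tokens : List String) (n i j : Nat) : List String :=
  if _h : j < n then
    if tags.getD j "" = "AUX" ∨ tags.getD j "" = "VERB" then tags
    else if (tags.getD j "" = "SCONJ" ∨ tags.getD j "" = "PUNCT") ∨
        PySem.Str.lower (tokens.getD j "") = "som" ∨ j = n - 1 then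
      tags.set i "VERB"
    else pvInnerA tags tokens n i (j + 1)
  else tags
termination_by n - j

def ud_verb_heuristics (ud_tags : List String) (tokens : List String) (lemmas : List String) : List String :=
  (List.range ud_tags.length).foldl (fun tags i =>
    if tags.getD i "" = "AUX" then
      if lemmas.getD i "" = "vara" then tags
      else pvInnerA tags tokens ud_tags.length i (i + 1)
    else tags) ud_tags

-- ===== PORT B =====
-- one iteration of B's forward loop; state = (res, pending AUX positions)
def pvStepB (ud tokens lemmas : List String) (n : Nat)
    (st : List String × List Nat) (j : Nat) : List String × List Nat :=
  let t := ud.getD j ""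
  let st1 :=
    if t = "AUX" ∨ t = "VERB" then (st.1, ([] : List Nat))
    else if st.2 ≠ [] ∧ ((t = "SCONJ" ∨ t = "PUNCT") ∨
        PySem.Str.lower (tokens.getD j "") = "som" ∨ j = n - 1) then
      (st.2.foldl (fun r i => r.set i "VERB") st.1, [])
    else st
  if t = "AUX" ∧ lemmas.getD j "" ≠ "vara" then (st1.1, st1.2 ++ [j]) else st1

def ud_verb_heuristics_alt (ud_tags : List String) (tokens : List String) (lemmas : List String) : List String :=
  ((List.range ud_tags.length).foldl
    (pvStepB ud_tags tokens lemmas ud_tags.length) (ud_tags, [])).1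

-- ===== PRECONDITION & SPEC =====
-- Pre_ holds exactly when Python A returns: every AUX position has a lemma to read, and every
-- non-AUX/VERB/SCONJ/PUNCT position that some active scan reaches (an earlier non-'vara' AUX with
-- no break or decision in between) has a token to read; A (and B) raise IndexError otherwise.
def pvNeutralTag (t : String) : Bool :=
  !(t == "AUX" || t == "VERB" || t == "SCONJ" || t == "PUNCT")

def Pre_ud_verb_heuristics (ud_tags : List String) (tokens : List String) (lemmas : List String) : Prop :=
  (((List.range ud_tags.length).all (fun i =>
      !(ud_tags.getD i "" == "AUX") || decide (i < lemmas.length))) &&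
   ((List.range ud_tags.length).all (fun j =>
      !(pvNeutralTag (ud_tags.getD j "")) ||
      !((List.range j).any (fun i =>
          (ud_tags.getD i "" == "AUX") && (lemmas.getD i "" != "vara") &&
          ((List.range j).all (fun k =>
            decide (k ≤ i) ||
            (pvNeutralTag (ud_tags.getD k "") &&
             (PySem.Str.lower (tokens.getD k "") != "som")))))) ||
      decide (j < tokens.length)))) = true
instance (ud_tags : List String) (tokens : List String) (lemmas : List String) : Decidable (Pre_ud_verb_heuristics ud_tags tokens lemmas) := by unfold Pre_ud_verb_heuristics; infer_instance
def pvWitness_ud_verb_heuristics : List String × List String × List String :=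
  (["AUX", "NOUN", "PUNCT"], ["har", "hund", "."], ["ha", "hund", "."])

def Spec_ud_verb_heuristics (ud_tags : List String) (tokens : List String) (lemmas : List String) (out : List String) : Prop := out = ud_verb_heuristics_alt ud_tags tokens lemmas
instance (ud_tags : List String) (tokens : List String) (lemmas : List String) (out : List String) : Decidable (Spec_ud_verb_heuristics ud_tags tokens lemmas out) := by unfold Spec_ud_verb_heuristics; infer_instance

-- ===== CLAIM (what is proved, stated in full; the proofs are below) =====
def Claim_equal_ud_verb_heuristics : Prop := ∀ (ud_tags : List String) (tokens : List String) (lemmas : List String), Dom_ud_verb_heuristics ud_tags tokens lemmas → Pre_ud_verb_heuristics ud_tags tokens lemmas → Spec_ud_verb_heuristics ud_tags tokens lemmas (ud_verb_heuristics ud_tags tokens lemmas)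

-- ===== LEMMAS AND PROOFS =====

-- the decision A's forward scan from position j reaches, on the ORIGINAL tags
def pvScan (ud tokens : List String) (n j : Nat) : Bool :=
  if _h : j < n then
    if ud.getD j "" = "AUX" ∨ ud.getD j "" = "VERB" then false
    else if (ud.getD j "" = "SCONJ" ∨ ud.getD j "" = "PUNCT") ∨
        PySem.Str.lower (tokens.getD j "") = "som" ∨ j = n - 1 then true
    else pvScan ud tokens n (j + 1)
  else false
termination_by n - j

def pvTarget (ud tokens lemmas : List String) : List String :=
  ud.mapIdx (fun i t =>
    if t = "AUX" ∧ lemmas.getD i "" ≠ "vara" ∧ pvScan ud tokens ud.length (i + 1) = true then "VERB" else t)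

theorem pvScan_ge (ud tokens : List String) (n j : Nat) (h : n ≤ j) :
    pvScan ud tokens n j = false := by
  unfold pvScan; rw [dif_neg (by omega)]

theorem pvScan_lt (ud tokens : List String) (n j : Nat) (h : j < n) :
    pvScan ud tokens n j =
      (if ud.getD j "" = "AUX" ∨ ud.getD j "" = "VERB" then false
       else if (ud.getD j "" = "SCONJ" ∨ ud.getD j "" = "PUNCT") ∨
           PySem.Str.lower (tokens.getD j "") = "som" ∨ j = n - 1 then true
       else pvScan ud tokens n (j + 1)) := by
  conv_lhs => unfold pvScan
  rw [dif_pos h]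

theorem pvTarget_length (ud tokens lemmas : List String) :
    (pvTarget ud tokens lemmas).length = ud.length := by
  simp [pvTarget]

theorem pvTarget_getD (ud tokens lemmas : List String) (k : Nat) (hk : k < ud.length) :
    (pvTarget ud tokens lemmas).getD k "" =
      (if ud.getD k "" = "AUX" ∧ lemmas.getD k "" ≠ "vara" ∧ pvScan ud tokens ud.length (k + 1) = true
       then "VERB" else ud.getD k "") := by
  have h2 : k < (pvTarget ud tokens lemmas).length := by simp [pvTarget_length]; omega
  rw [List.getD_eq_getElem _ _ h2, List.getD_eq_getElem _ _ hk]
  simp [pvTarget]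

-- A's inner scan, on a tags list agreeing with ud from j on, is pvScan plus one set
theorem innerA_eq (ud tokens : List String) (n : Nat) :
    ∀ (d j i : Nat) (tags : List String), n - j ≤ d → tags.length = n →
    (∀ k, j ≤ k → tags.getD k "" = ud.getD k "") →
    pvInnerA tags tokens n i j = (if pvScan ud tokens n j then tags.set i "VERB" else tags) := by
  intro d
  induction d with
  | zero =>
    intro j i tags hd _ _
    unfold pvInnerA pvScan
    rw [dif_neg (by omega), dif_neg (by omega)]
    simp
  | succ d ih =>
    intro j i tags hd hl hagree
    by_cases hj : j < n
    · have hgj : tags.getD j "" = ud.getD j "" := hagree j (Nat.le_refl _)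
      unfold pvInnerA pvScan
      rw [dif_pos hj, dif_pos hj, hgj]
      by_cases h1 : ud.getD j "" = "AUX" ∨ ud.getD j "" = "VERB"
      · have h1' := h1
        simp only [List.getD_eq_getElem?_getD] at h1'
        rcases h1' with h | h <;> simp [h]
      · by_cases h2 : (ud.getD j "" = "SCONJ" ∨ ud.getD j "" = "PUNCT") ∨
            PySem.Str.lower (tokens.getD j "") = "som" ∨ j = n - 1
        · have h1' := h1
          have h2' := h2
          simp only [List.getD_eq_getElem?_getD] at h1' h2'
          rw [not_or] at h1'
          simp [h1'.1, h1'.2, h2']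
        · simp only [if_neg h1, if_neg h2]
          exact ih (j + 1) i tags (by omega) hl (fun k hk => hagree k (by omega))
    · unfold pvInnerA pvScan
      rw [dif_neg hj, dif_neg hj]
      simp

-- the outer fold's invariant: processed prefix equals pvTarget, unprocessed suffix equals ud
theorem outer_inv (ud tokens lemmas : List String) :
    ∀ (d m : Nat) (tags : List String), ud.length - m ≤ d → m ≤ ud.length → tags.length = ud.length →
    (∀ k, m ≤ k → tags.getD k "" = ud.getD k "") →
    (∀ k, k < m → tags.getD k "" = (pvTarget ud tokens lemmas).getD k "") →
    ((List.range' m (ud.length - m)).foldl (fun tags i =>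
        if tags.getD i "" = "AUX" then
          if lemmas.getD i "" = "vara" then tags
          else pvInnerA tags tokens ud.length i (i + 1)
        else tags) tags).length = ud.length ∧
    (∀ k, k < ud.length →
      ((List.range' m (ud.length - m)).foldl (fun tags i =>
        if tags.getD i "" = "AUX" then
          if lemmas.getD i "" = "vara" then tags
          else pvInnerA tags tokens ud.length i (i + 1)
        else tags) tags).getD k "" = (pvTarget ud tokens lemmas).getD k "") := by
  intro d
  induction d with
  | zero =>
    intro m tags hd hm hl _ hpre
    have : ud.length - m = 0 := by omega
    rw [this]
    exact ⟨hl, fun k hk => hpre k (by omega)⟩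
  | succ d ih =>
    intro m tags hd hm hl hsuf hpre
    by_cases hmn : m < ud.length
    · have hstep : ud.length - m = (ud.length - (m + 1)) + 1 := by omega
      rw [hstep, List.range'_succ, List.foldl_cons]
      have hgm : tags.getD m "" = ud.getD m "" := hsuf m (Nat.le_refl _)
      set T := pvTarget ud tokens lemmas with hT
      have htm : T.getD m "" =
          (if ud.getD m "" = "AUX" ∧ lemmas.getD m "" ≠ "vara" ∧ pvScan ud tokens ud.length (m + 1) = true
           then "VERB" else ud.getD m "") := pvTarget_getD ud tokens lemmas m hmn
      have htm' := htm
      simp only [List.getD_eq_getElem?_getD] at htm'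
      by_cases hA : ud.getD m "" = "AUX"
      · by_cases hv : lemmas.getD m "" = "vara"
        · rw [if_pos (by rw [hgm]; exact hA), if_pos hv]
          apply ih (m + 1) tags (by omega) (by omega) hl
            (fun k hk => hsuf k (by omega))
          intro k hk
          rcases Nat.lt_or_ge k m with h | h
          · exact hpre k h
          · have : k = m := by omega
            subst this
            have hv' := hv
            simp only [List.getD_eq_getElem?_getD] at hv' hgm ⊢
            rw [htm', if_neg (by simp [hv']), hgm]
        · rw [if_pos (by rw [hgm]; exact hA), if_neg hv]
          rw [innerA_eq ud tokens ud.length (ud.length - (m + 1)) (m + 1) m tags (by omega) hl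
            (fun k hk => hsuf k (by omega))]
          by_cases hs : pvScan ud tokens ud.length (m + 1) = true
          · rw [if_pos hs]
            apply ih (m + 1) (tags.set m "VERB") (by omega) (by omega) (by simpa using hl)
            · intro k hk
              simp only [List.getD_eq_getElem?_getD]
              rw [List.getElem?_set_ne (by omega)]
              have := hsuf k (by omega)
              simpa [List.getD_eq_getElem?_getD] using this
            · intro k hk
              rcases Nat.lt_or_ge k m with h | h
              · simp only [List.getD_eq_getElem?_getD]
                rw [List.getElem?_set_ne (by omega)]
                have := hpre k h
                simpa [List.getD_eq_getElem?_getD] using this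
              · have : k = m := by omega
                subst this
                simp only [List.getD_eq_getElem?_getD]
                rw [List.getElem?_set_self (by omega)]
                have hA' := hA; have hv' := hv
                simp only [List.getD_eq_getElem?_getD] at hA' hv'
                rw [htm', if_pos ⟨hA', hv', hs⟩]
                rfl
          · rw [if_neg hs]
            apply ih (m + 1) tags (by omega) (by omega) hl
              (fun k hk => hsuf k (by omega))
            intro k hk
            rcases Nat.lt_or_ge k m with h | h
            · exact hpre k h
            · have : k = m := by omega
              subst this
              simp only [List.getD_eq_getElem?_getD] at hgm ⊢
              rw [htm', if_neg (by intro ⟨_, _, h3⟩; exact hs h3), hgm]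
      · rw [if_neg (by rw [hgm]; exact hA)]
        apply ih (m + 1) tags (by omega) (by omega) hl
          (fun k hk => hsuf k (by omega))
        intro k hk
        rcases Nat.lt_or_ge k m with h | h
        · exact hpre k h
        · have : k = m := by omega
          subst this
          have hA' := hA
          simp only [List.getD_eq_getElem?_getD] at hA' hgm ⊢
          rw [htm', if_neg (by intro ⟨h1, _⟩; exact hA' h1), hgm]
    · have : ud.length - m = 0 := by omega
      rw [this]
      exact ⟨hl, fun k hk => hpre k (by omega)⟩

theorem a_eq_target (ud tokens lemmas : List String) :
    ud_verb_heuristics ud tokens lemmas = pvTarget ud tokens lemmas := by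
  have h := outer_inv ud tokens lemmas ud.length 0 ud (by omega) (by omega) rfl
    (fun k _ => rfl) (fun k hk => absurd hk (by omega))
  rw [Nat.sub_zero] at h
  unfold ud_verb_heuristics
  rw [List.range_eq_range']
  apply List.ext_getElem
  · rw [h.1, pvTarget_length]
  · intro i h1 h2
    have hi : i < ud.length := by rw [h.1] at h1; exact h1
    have := h.2 i hi
    rwa [List.getD_eq_getElem _ _ h1, List.getD_eq_getElem _ _ h2] at this

-- flushing the pending list sets exactly its members to VERB
theorem setVerb_foldl (l : List Nat) :
    ∀ (res : List String), (∀ i ∈ l, i < res.length) →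
    (l.foldl (fun r i => r.set i "VERB") res).length = res.length ∧
    (∀ k, (l.foldl (fun r i => r.set i "VERB") res).getD k "" =
      (if k ∈ l then "VERB" else res.getD k "")) := by
  induction l with
  | nil => intro res _; simp
  | cons i l ih =>
    intro res h
    rw [List.foldl_cons]
    have hi : i < res.length := h i (by simp)
    obtain ⟨hlen, hget⟩ := ih (res.set i "VERB")
      (fun x hx => by simpa using h x (by simp [hx]))
    refine ⟨by rw [hlen]; simp, fun k => ?_⟩
    rw [hget k]
    by_cases hk : k ∈ l
    · simp [hk]
    · by_cases hki : k = i
      · subst hki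
        simp [hk, List.getD_eq_getElem?_getD, List.getElem?_set_self hi]
      · simp [hk, hki, List.getD_eq_getElem?_getD,
          List.getElem?_set_ne (fun h => hki h.symm)]

-- B's forward pass invariant
theorem stepB_inv (ud tokens lemmas : List String) :
    ∀ (d j : Nat) (res : List String) (pending : List Nat),
    ud.length - j ≤ d → j ≤ ud.length → res.length = ud.length →
    (∀ i ∈ pending, i < j ∧ ud.getD i "" = "AUX" ∧ lemmas.getD i "" ≠ "vara" ∧
        pvScan ud tokens ud.length (i + 1) = pvScan ud tokens ud.length j) →
    (∀ i ∈ pending, res.getD i "" = ud.getD i "") →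
    (∀ k, k < j → k ∉ pending → res.getD k "" = (pvTarget ud tokens lemmas).getD k "") →
    (∀ k, j ≤ k → res.getD k "" = ud.getD k "") →
    ((List.range' j (ud.length - j)).foldl
        (pvStepB ud tokens lemmas ud.length) (res, pending)).1.length = ud.length ∧
    (∀ k, k < ud.length →
      ((List.range' j (ud.length - j)).foldl
        (pvStepB ud tokens lemmas ud.length) (res, pending)).1.getD k "" =
        (pvTarget ud tokens lemmas).getD k "") := by
  intro d
  induction d with
  | zero =>
    intro j res pending hd hj hl hpen hpres hdone hsuf
    have h0 : ud.length - j = 0 := by omega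
    rw [h0]
    simp only [List.range'_zero, List.foldl_nil]
    refine ⟨hl, fun k hk => ?_⟩
    by_cases hkp : k ∈ pending
    · obtain ⟨_, hA, hv, hs⟩ := hpen k hkp
      rw [hpres k hkp, pvTarget_getD ud tokens lemmas k hk,
        if_neg (by
          intro ⟨_, _, h3⟩
          rw [hs, pvScan_ge ud tokens _ _ (by omega)] at h3
          exact Bool.false_ne_true h3)]
    · exact hdone k (by omega) hkp
  | succ d ih =>
    intro j res pending hd hj hl hpen hpres hdone hsuf
    by_cases hjn : j < ud.length
    · have hstep : ud.length - j = (ud.length - (j + 1)) + 1 := by omega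
      rw [hstep, List.range'_succ, List.foldl_cons]
      set T := pvTarget ud tokens lemmas with hT
      have htj : T.getD j "" =
          (if ud.getD j "" = "AUX" ∧ lemmas.getD j "" ≠ "vara" ∧ pvScan ud tokens ud.length (j + 1) = true
           then "VERB" else ud.getD j "") := pvTarget_getD ud tokens lemmas j hjn
      have hgj : res.getD j "" = ud.getD j "" := hsuf j (Nat.le_refl _)
      by_cases h1 : ud.getD j "" = "AUX" ∨ ud.getD j "" = "VERB"
      · have hsj : pvScan ud tokens ud.length j = false := by
          rw [pvScan_lt ud tokens _ _ hjn, if_pos h1]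
        -- pending positions are decided KEEP here
        have hkeep : ∀ k ∈ pending, res.getD k "" = T.getD k "" := by
          intro k hkp
          obtain ⟨hklt, hA, hv, hs⟩ := hpen k hkp
          rw [hpres k hkp, pvTarget_getD ud tokens lemmas k (by omega),
            if_neg (by intro ⟨_, _, h3⟩; rw [hs, hsj] at h3; exact Bool.false_ne_true h3)]
        by_cases hadd : ud.getD j "" = "AUX" ∧ lemmas.getD j "" ≠ "vara"
        · have hstepeq : pvStepB ud tokens lemmas ud.length (res, pending) j = (res, [j]) := by
            have hadd' := hadd
            simp only [List.getD_eq_getElem?_getD] at hadd'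
            simp [pvStepB, hadd']
          rw [hstepeq]
          apply ih (j + 1) res [j] (by omega) (by omega) hl
          · intro i hi
            simp only [List.mem_singleton] at hi
            subst hi
            exact ⟨by omega, hadd.1, hadd.2, rfl⟩
          · intro i hi
            simp only [List.mem_singleton] at hi
            subst hi
            exact hgj
          · intro k hk hkp
            simp only [List.mem_singleton] at hkp
            rcases Nat.lt_or_ge k j with h | h
            · by_cases hkpen : k ∈ pending
              · exact hkeep k hkpen
              · exact hdone k h hkpen
            · omega
          · intro k hk
            exact hsuf k (by omega)
        · have hstepeq : pvStepB ud tokens lemmas ud.length (res, pending) j = (res, []) := by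
            have h1' := h1; have hadd' := hadd
            simp only [List.getD_eq_getElem?_getD] at h1' hadd'
            simp [pvStepB, h1', hadd']
          rw [hstepeq]
          apply ih (j + 1) res [] (by omega) (by omega) hl
            (by simp) (by simp)
          · intro k hk _
            rcases Nat.lt_or_ge k j with h | h
            · by_cases hkpen : k ∈ pending
              · exact hkeep k hkpen
              · exact hdone k h hkpen
            · have : k = j := by omega
              subst this
              rw [hgj, htj, if_neg (by intro ⟨hA, hv, _⟩; exact hadd ⟨hA, hv⟩)]
          · intro k hk
            exact hsuf k (by omega)
      · have htA : ¬ ud.getD j "" = "AUX" := fun h => h1 (Or.inl h)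
        by_cases h2 : pending ≠ [] ∧ ((ud.getD j "" = "SCONJ" ∨ ud.getD j "" = "PUNCT") ∨
            PySem.Str.lower (tokens.getD j "") = "som" ∨ j = ud.length - 1)
        · have hsj : pvScan ud tokens ud.length j = true := by
            rw [pvScan_lt ud tokens _ _ hjn, if_neg h1, if_pos h2.2]
          have hstepeq : pvStepB ud tokens lemmas ud.length (res, pending) j =
              (pending.foldl (fun r i => r.set i "VERB") res, []) := by
            have h2' := h2; have htA' := htA
            have htV : ¬ ud.getD j "" = "VERB" := fun h => h1 (Or.inr h)
            simp only [List.getD_eq_getElem?_getD] at h2' htA' htV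
            simp [pvStepB, h2', htA', htV]
          rw [hstepeq]
          obtain ⟨hflen, hfget⟩ := setVerb_foldl pending res
            (fun i hi => by rw [hl]; exact lt_trans (hpen i hi).1 hjn)
          apply ih (j + 1) _ [] (by omega) (by omega) (by rw [hflen, hl])
            (by simp) (by simp)
          · intro k hk _
            rw [hfget k]
            by_cases hkp : k ∈ pending
            · rw [if_pos hkp]
              obtain ⟨hklt, hA, hv, hs⟩ := hpen k hkp
              rw [pvTarget_getD ud tokens lemmas k (by omega),
                if_pos ⟨hA, hv, by rw [hs]; exact hsj⟩]
            · rw [if_neg hkp]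
              rcases Nat.lt_or_ge k j with h | h
              · exact hdone k h hkp
              · have : k = j := by omega
                subst this
                rw [hgj, htj, if_neg (by intro ⟨hA, _, _⟩; exact htA hA)]
          · intro k hk
            rw [hfget k, if_neg (fun hkp => by have := (hpen k hkp).1; omega)]
            exact hsuf k (by omega)
        · have hstepeq : pvStepB ud tokens lemmas ud.length (res, pending) j = (res, pending) := by
            have h2' := h2; have htA' := htA
            have htV : ¬ ud.getD j "" = "VERB" := fun h => h1 (Or.inr h)
            simp only [List.getD_eq_getElem?_getD] at h2' htA' htV
            simp [pvStepB, h2', htA', htV]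
          rw [hstepeq]
          apply ih (j + 1) res pending (by omega) (by omega) hl
          · intro i hi
            obtain ⟨hklt, hA, hv, hs⟩ := hpen i hi
            refine ⟨by omega, hA, hv, ?_⟩
            rw [hs, pvScan_lt ud tokens _ _ hjn, if_neg h1,
              if_neg (fun hc => h2 ⟨fun he => by simp [he] at hi, hc⟩)]
          · exact hpres
          · intro k hk hkp
            rcases Nat.lt_or_ge k j with h | h
            · exact hdone k h hkp
            · have : k = j := by omega
              subst this
              rw [hgj, htj, if_neg (by intro ⟨hA, _, _⟩; exact htA hA)]
          · intro k hk
            exact hsuf k (by omega)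
    · have h0 : ud.length - j = 0 := by omega
      rw [h0]
      simp only [List.range'_zero, List.foldl_nil]
      refine ⟨hl, fun k hk => ?_⟩
      by_cases hkp : k ∈ pending
      · obtain ⟨_, hA, hv, hs⟩ := hpen k hkp
        rw [hpres k hkp, pvTarget_getD ud tokens lemmas k hk,
          if_neg (by
            intro ⟨_, _, h3⟩
            rw [hs, pvScan_ge ud tokens _ _ (by omega)] at h3
            exact Bool.false_ne_true h3)]
      · exact hdone k (by omega) hkp

theorem alt_eq_target (ud tokens lemmas : List String) :
    ud_verb_heuristics_alt ud tokens lemmas = pvTarget ud tokens lemmas := by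
  have h := stepB_inv ud tokens lemmas ud.length 0 ud [] (by omega) (by omega) rfl
    (by simp) (by simp) (fun k hk _ => absurd hk (by omega)) (fun k _ => rfl)
  rw [Nat.sub_zero] at h
  unfold ud_verb_heuristics_alt
  rw [List.range_eq_range']
  apply List.ext_getElem
  · rw [h.1, pvTarget_length]
  · intro i h1 h2
    have hi : i < ud.length := by rw [h.1] at h1; exact h1
    have := h.2 i hi
    rwa [List.getD_eq_getElem _ _ h1, List.getD_eq_getElem _ _ h2] at this

-- ===== VERDICT (by name: the statement is the Claim_ definition above) =====
theorem ud_verb_heuristics_spec : Claim_equal_ud_verb_heuristics := by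
  intro ud tokens lemmas _ _
  unfold Spec_ud_verb_heuristics
  rw [a_eq_target, alt_eq_target]
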